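-- pv_equiv track=rewrite | github.com/jtihomirovs/2021-complete-python-bootcamp | s6_function_practice_exercises.py | summer_69_v2
-- ===== SOURCE A (Python) =====
-- def summer_69_v2(arr):
--     total = 0
--     add = True
--
--     for num in arr:
--         while add:
--             if num != 6:
--                 total += num
--                 break  # break from while loop. Bring back to for loop
--             else:
--                 add = False  # and now i am waiting for the 9 - algorithm goes to while no section
--         while not add:
--             if num != 9:
--                 break
--             else:
--                 add = True
--                 break
--     return total
-- ===== SOURCE B (Python) =====
-- def summer_69_v2(arr):
--     total = 0
--     i = 0
--     n = len(arr)
--     while i < n: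
--         if arr[i] != 6:
--             total += arr[i]
--             i += 1
--         else:
--             i += 1
--             while i < n and arr[i] != 9:
--                 i += 1
--             i += 1  # step past the closing 9 (or past the end)
--     return total
-- ===== Notes on version B (the rewrite author's own statement) =====
-- stated objective: alternative
-- what changed: Replaces the cross-iteration boolean state machine (for-loop with two inner while loops over an 'add' flag) by an index-driven outer scan with an inner skip-loop that jumps past each 6..9 section.
import Mathlib
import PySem

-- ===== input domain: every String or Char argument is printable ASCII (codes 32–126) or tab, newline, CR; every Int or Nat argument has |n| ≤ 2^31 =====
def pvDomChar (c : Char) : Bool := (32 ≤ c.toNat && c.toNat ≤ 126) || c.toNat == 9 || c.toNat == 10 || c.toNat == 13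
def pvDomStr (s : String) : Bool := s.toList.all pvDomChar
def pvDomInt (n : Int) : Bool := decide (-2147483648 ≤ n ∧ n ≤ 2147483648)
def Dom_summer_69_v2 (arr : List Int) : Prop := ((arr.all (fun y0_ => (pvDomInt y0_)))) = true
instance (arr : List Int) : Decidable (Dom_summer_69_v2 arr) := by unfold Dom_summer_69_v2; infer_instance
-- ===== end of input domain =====

-- B replaces A's cross-iteration boolean state machine by an outer scan with an inner skip-loop; same O(n) cost, different decomposition.


-- ===== PORT A =====
-- One step of A's for-body on (total, add). Both inner `while` loops of A terminate
-- within one pass over their branches for a fixed `num`: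
--   `while add:`  — if num ≠ 6 it adds num and breaks (add stays true); otherwise it sets
--   add = False, the loop re-tests `add` (now false) and exits, and the second loop
--   `while not add:` then sees num = 6 ≠ 9 and breaks with add still false.
--   With add false, only the second loop runs: num = 9 sets add = True and breaks,
--   otherwise it breaks leaving add false. This exact case analysis is transcribed below.
def summer69StepA (s : Int × Bool) (num : Int) : Int × Bool :=
  if s.2 then
    (if num ≠ 6 then (s.1 + num, true) else (s.1, false))
  else
    (if num ≠ 9 then (s.1, false) else (s.1, true))

def summer_69_v2 (arr : List Int) : Int :=
  (arr.foldl summer69StepA (0, true)).1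

-- ===== PORT B =====
mutual
-- B's outer while loop over the index: sum until a 6 is met.
def summer69Go : List Int → Int
  | [] => 0
  | x :: xs => if x ≠ 6 then x + summer69Go xs else summer69Skip xs
-- B's inner skip-loop: advance until a 9 (or the end), then step past it and resume.
def summer69Skip : List Int → Int
  | [] => 0
  | x :: xs => if x ≠ 9 then summer69Skip xs else summer69Go xs
end

def summer_69_v2_alt (arr : List Int) : Int := summer69Go arr

-- ===== PRECONDITION & SPEC =====
def Spec_summer_69_v2 (arr : List Int) (out : Int) : Prop := out = summer_69_v2_alt arr
instance (arr : List Int) (out : Int) : Decidable (Spec_summer_69_v2 arr out) := by unfold Spec_summer_69_v2; infer_instance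

-- ===== CLAIM (what is proved, stated in full; the proofs are below) =====
def Claim_equal_summer_69_v2 : Prop := ∀ (arr : List Int), Dom_summer_69_v2 arr → Spec_summer_69_v2 arr (summer_69_v2 arr)

-- ===== LEMMAS AND PROOFS =====
-- Invariant: A's fold started with add = true computes t + Go, with add = false it computes t + Skip.
theorem summer69_fold_inv (xs : List Int) : ∀ t : Int,
    (xs.foldl summer69StepA (t, true)).1 = t + summer69Go xs ∧
    (xs.foldl summer69StepA (t, false)).1 = t + summer69Skip xs := by
  induction xs with
  | nil => intro t; simp [summer69Go, summer69Skip]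
  | cons x xs ih =>
    intro t
    constructor
    · by_cases h : x = 6
      · simp [List.foldl, summer69StepA, summer69Go, h, (ih t).2]
      · simp [List.foldl, summer69StepA, summer69Go, h, (ih (t + x)).1, add_assoc]
    · by_cases h : x = 9
      · simp [List.foldl, summer69StepA, summer69Skip, h, (ih t).1]
      · simp [List.foldl, summer69StepA, summer69Skip, h, (ih t).2]

-- ===== VERDICT (by name: the statement is the Claim_ definition above) =====
theorem summer_69_v2_spec : Claim_equal_summer_69_v2 := by
  intro arr _
  unfold Spec_summer_69_v2 summer_69_v2 summer_69_v2_alt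
  simpa using (summer69_fold_inv arr 0).1
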